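-- pv_equiv track=rewrite | github.com/MPuzio15/python_pyplot | kalendarz.py | how_many_sundays_a_month
-- ===== SOURCE A (Python) =====
-- def what_day_do_we_have(r, m, d):
--
--     rm = (-1, 0, 3, 3, 6, 1, 4, 6, 2, 5, 0, 3, 5)
--     dt = d + rm[m] + (r-1900) + (r-1900)//4
--     if m < 3 and r % 4 == 0:
--         dt = dt - 1
--     result = dt % 7
--     return result
--
-- def how_many_sundays_a_month(r, m):
--     niedziele = 0
--     liczba_dni_w_miesiacu = (0, 31, 28, 31, 30, 31, 30, 31, 31, 30, 31, 30, 31)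
--     liczba_dni_w_miesiacu_rok_przestepny = (0, 31, 29, 31, 30, 31, 30, 31, 31, 30, 31, 30, 31)
--     if r % 4 == 0:
--         for d in range(1, liczba_dni_w_miesiacu_rok_przestepny[m] + 1):
--             result = what_day_do_we_have(r, m, d)
--             if result == 0:
--                 niedziele += 1
--     else:
--         for d in range(1, liczba_dni_w_miesiacu[m] + 1):
--             result = what_day_do_we_have(r, m, d)
--             if result == 0:
--                 niedziele += 1
--     return niedziele
-- ===== SOURCE B (Python) =====
-- def what_day_do_we_have(r, m, d):
--     rm = (-1, 0, 3, 3, 6, 1, 4, 6, 2, 5, 0, 3, 5)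
--     dt = d + rm[m] + (r-1900) + (r-1900)//4
--     if m < 3 and r % 4 == 0:
--         dt = dt - 1
--     result = dt % 7
--     return result
--
-- def how_many_sundays_a_month(r, m):
--     dni = (0, 31, 29, 31, 30, 31, 30, 31, 31, 30, 31, 30, 31) if r % 4 == 0 \
--         else (0, 31, 28, 31, 30, 31, 30, 31, 31, 30, 31, 30, 31)
--     n = dni[m]
--     first = what_day_do_we_have(r, m, 1)
--     target = (1 - first) % 7
--     if target == 0:
--         target = 7
--     return 0 if target > n else (n - target) // 7 + 1
-- ===== Notes on version B (the rewrite author's own statement) =====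
-- stated objective: simpler
-- what changed: B replaces A's day-by-day loop over the month (calling the weekday helper once per day) by a single helper call for day 1 and a closed-form residue count of Sundays.
import Mathlib
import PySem

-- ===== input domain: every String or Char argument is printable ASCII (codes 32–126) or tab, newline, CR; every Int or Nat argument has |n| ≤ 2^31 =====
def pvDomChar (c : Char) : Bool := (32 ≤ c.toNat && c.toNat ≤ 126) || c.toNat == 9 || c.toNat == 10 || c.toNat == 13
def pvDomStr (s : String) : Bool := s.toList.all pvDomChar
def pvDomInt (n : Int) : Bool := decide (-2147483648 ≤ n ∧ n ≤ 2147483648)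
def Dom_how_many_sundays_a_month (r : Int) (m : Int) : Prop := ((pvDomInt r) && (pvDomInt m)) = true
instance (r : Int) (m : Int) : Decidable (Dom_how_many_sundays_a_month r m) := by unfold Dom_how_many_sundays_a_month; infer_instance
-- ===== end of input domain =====

-- B replaces A's day-by-day loop by a closed-form residue count from the weekday of day 1 (objective: simpler).

-- ===== PORT A =====
def what_day_do_we_have (r m d : Int) : Int :=
  let rm : List Int := [-1, 0, 3, 3, 6, 1, 4, 6, 2, 5, 0, 3, 5]
  let dt := d + PySem.List.pyGetD rm m 0 + (r - 1900) + PySem.Int.floordiv (r - 1900) 4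
  let dt := if m < 3 ∧ PySem.Int.mod r 4 = 0 then dt - 1 else dt
  PySem.Int.mod dt 7

def how_many_sundays_a_month (r : Int) (m : Int) : Int :=
  let liczba_dni : List Int := [0, 31, 28, 31, 30, 31, 30, 31, 31, 30, 31, 30, 31]
  let liczba_dni_przestepny : List Int := [0, 31, 29, 31, 30, 31, 30, 31, 31, 30, 31, 30, 31]
  if PySem.Int.mod r 4 = 0 then
    (PySem.List.pyRange 1 (PySem.List.pyGetD liczba_dni_przestepny m 0 + 1) 1).foldl
      (fun niedziele d => if what_day_do_we_have r m d = 0 then niedziele + 1 else niedziele) 0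
  else
    (PySem.List.pyRange 1 (PySem.List.pyGetD liczba_dni m 0 + 1) 1).foldl
      (fun niedziele d => if what_day_do_we_have r m d = 0 then niedziele + 1 else niedziele) 0

-- ===== PORT B =====
def what_day_do_we_have_alt (r m d : Int) : Int :=
  let rm : List Int := [-1, 0, 3, 3, 6, 1, 4, 6, 2, 5, 0, 3, 5]
  let dt := d + PySem.List.pyGetD rm m 0 + (r - 1900) + PySem.Int.floordiv (r - 1900) 4
  let dt := if m < 3 ∧ PySem.Int.mod r 4 = 0 then dt - 1 else dt
  PySem.Int.mod dt 7

def how_many_sundays_a_month_alt (r : Int) (m : Int) : Int :=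
  let dni : List Int :=
    if PySem.Int.mod r 4 = 0 then [0, 31, 29, 31, 30, 31, 30, 31, 31, 30, 31, 30, 31]
    else [0, 31, 28, 31, 30, 31, 30, 31, 31, 30, 31, 30, 31]
  let n := PySem.List.pyGetD dni m 0
  let first := what_day_do_we_have_alt r m 1
  let target0 := PySem.Int.mod (1 - first) 7
  let target := if target0 = 0 then 7 else target0
  if target > n then 0 else PySem.Int.floordiv (n - target) 7 + 1

-- ===== PRECONDITION & SPEC =====
-- Pre_ excludes only the month indices m < -13 or m > 12, on which A raises IndexError
-- on the 13-element month tables; inside Pre_ (including negative-index wraparound months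
-- and m = 0) A returns normally and B matches it.
def Pre_how_many_sundays_a_month (r : Int) (m : Int) : Prop := -13 ≤ m ∧ m ≤ 12
instance (r : Int) (m : Int) : Decidable (Pre_how_many_sundays_a_month r m) := by unfold Pre_how_many_sundays_a_month; infer_instance
def pvWitness_how_many_sundays_a_month : Int × Int := (2023, 4)

def Spec_how_many_sundays_a_month (r : Int) (m : Int) (out : Int) : Prop := out = how_many_sundays_a_month_alt r m
instance (r : Int) (m : Int) (out : Int) : Decidable (Spec_how_many_sundays_a_month r m out) := by unfold Spec_how_many_sundays_a_month; infer_instance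

-- ===== CLAIM (what is proved, stated in full; the proofs are below) =====
def Claim_equal_how_many_sundays_a_month : Prop := ∀ (r : Int) (m : Int), Dom_how_many_sundays_a_month r m → Pre_how_many_sundays_a_month r m → Spec_how_many_sundays_a_month r m (how_many_sundays_a_month r m)

-- ===== LEMMAS AND PROOFS =====

-- the day-independent part of what_day_do_we_have's dt (so weekday(d) = (d + C) % 7)
def pvC (r m : Int) : Int :=
  PySem.List.pyGetD ([-1, 0, 3, 3, 6, 1, 4, 6, 2, 5, 0, 3, 5] : List Int) m 0
    + (r - 1900) + PySem.Int.floordiv (r - 1900) 4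
    - (if m < 3 ∧ PySem.Int.mod r 4 = 0 then 1 else 0)

def pvN (r m : Int) : Int :=
  PySem.List.pyGetD
    (if PySem.Int.mod r 4 = 0 then ([0, 31, 29, 31, 30, 31, 30, 31, 31, 30, 31, 30, 31] : List Int)
     else ([0, 31, 28, 31, 30, 31, 30, 31, 31, 30, 31, 30, 31] : List Int)) m 0

def pvCountA (n C : Int) : Int :=
  (PySem.List.pyRange 1 (n + 1) 1).foldl
    (fun acc d => if PySem.Int.mod (d + C) 7 = 0 then acc + 1 else acc) 0

def pvCountB (n C : Int) : Int :=
  let first := PySem.Int.mod (1 + C) 7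
  let target0 := PySem.Int.mod (1 - first) 7
  let target := if target0 = 0 then 7 else target0
  if target > n then 0 else PySem.Int.floordiv (n - target) 7 + 1

lemma pvA_eq (r m : Int) : how_many_sundays_a_month r m = pvCountA (pvN r m) (pvC r m) := by
  unfold how_many_sundays_a_month pvCountA pvN pvC what_day_do_we_have
  by_cases hl : PySem.Int.mod r 4 = 0 <;> by_cases h3 : m < 3 <;>
    simp only [hl, h3, and_true, and_self, and_false, ite_true, ite_false] <;>
    (congr 1 <;> first | rfl | (funext acc d; ring_nf))

lemma pvB_eq (r m : Int) : how_many_sundays_a_month_alt r m = pvCountB (pvN r m) (pvC r m) := by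
  unfold how_many_sundays_a_month_alt pvCountB pvN pvC what_day_do_we_have_alt
  by_cases hl : PySem.Int.mod r 4 = 0 <;> by_cases h3 : m < 3 <;>
    simp only [hl, h3, and_true, and_self, and_false, ite_true, ite_false] <;> ring_nf

lemma pvN_mem (r m : Int) (h : -13 ≤ m ∧ m ≤ 12) :
    pvN r m = 0 ∨ pvN r m = 28 ∨ pvN r m = 29 ∨ pvN r m = 30 ∨ pvN r m = 31 := by
  obtain ⟨h1, h2⟩ := h
  unfold pvN
  by_cases hl : PySem.Int.mod r 4 = 0 <;> simp only [hl, ite_true, ite_false] <;>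
    interval_cases m <;> decide

lemma pvMod_shift (d C : Int) :
    PySem.Int.mod (d + C) 7 = PySem.Int.mod (d + PySem.Int.mod C 7) 7 := by
  rw [PySem.Int.mod_eq_emod_of_pos (a := d + C) (by norm_num),
      PySem.Int.mod_eq_emod_of_pos (a := C) (by norm_num),
      PySem.Int.mod_eq_emod_of_pos (a := d + C % 7) (by norm_num)]
  omega

lemma pvCore (n C : Int)
    (hn : n = 0 ∨ n = 28 ∨ n = 29 ∨ n = 30 ∨ n = 31) :
    pvCountA n C = pvCountB n C := by
  have hA : pvCountA n C = pvCountA n (PySem.Int.mod C 7) := by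
    unfold pvCountA
    congr 1
    funext acc d
    rw [pvMod_shift]
  have hB : pvCountB n C = pvCountB n (PySem.Int.mod C 7) := by
    unfold pvCountB
    have : PySem.Int.mod (1 + C) 7 = PySem.Int.mod (1 + PySem.Int.mod C 7) 7 := pvMod_shift 1 C
    rw [this]
  rw [hA, hB]
  have h0 : 0 ≤ PySem.Int.mod C 7 := PySem.Int.mod_nonneg C (by norm_num)
  have h7 : PySem.Int.mod C 7 < 7 := PySem.Int.mod_lt C (by norm_num)
  set c := PySem.Int.mod C 7 with hc
  clear_value c
  rcases hn with rfl | rfl | rfl | rfl | rfl <;> interval_cases c <;> decide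

-- ===== VERDICT (by name: the statement is the Claim_ definition above) =====
theorem how_many_sundays_a_month_spec : Claim_equal_how_many_sundays_a_month := by
  intro r m _ hpre
  unfold Spec_how_many_sundays_a_month
  rw [pvA_eq, pvB_eq]
  exact pvCore _ _ (pvN_mem r m hpre)
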